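-- pv_equiv track=rewrite | github.com/mohammadfaiizan/ProjectI | DSA/Problem/Queue_Stack/07_Expression_Evaluation_Parsing/726_Number_of_Atoms.py | countOfAtoms_recursive
-- ===== SOURCE A (Python) =====
-- from collections import defaultdict, Counter
--
-- def countOfAtoms_recursive(formula: str) -> str:
--     """
--     Approach 2: Recursive Approach
--
--     Use recursion to handle nested structures.
--
--     Time: O(n), Space: O(n)
--     """
--     def parse_formula(formula: str, index: int) -> tuple:
--         """Parse formula and return (atom_counts, next_index)"""
--         counts = defaultdict(int)
--
--         while index < len(formula):
--             if formula[index] == '(':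
--                 # Parse nested formula
--                 nested_counts, index = parse_formula(formula, index + 1)
--
--                 # Parse multiplier after closing parenthesis
--                 start = index
--                 while index < len(formula) and formula[index].isdigit():
--                     index += 1
--
--                 multiplier = int(formula[start:index]) if index > start else 1
--
--                 # Add nested counts with multiplier
--                 for atom, count in nested_counts.items():
--                     counts[atom] += count * multiplier
--
--             elif formula[index] == ')':
--                 # End of current group
--                 return counts, index + 1
--
--             else:
--                 # Parse atom
--                 atom, count, index = parse_atom(formula, index)
--                 counts[atom] += count
--
--         return counts, index
--
--     def parse_atom(formula: str, index: int) -> tuple: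
--         """Parse single atom and return (atom, count, next_index)"""
--         start = index
--         index += 1
--
--         # Parse atom name (uppercase + lowercase letters)
--         while index < len(formula) and formula[index].islower():
--             index += 1
--
--         atom = formula[start:index]
--         start = index
--
--         # Parse count
--         while index < len(formula) and formula[index].isdigit():
--             index += 1
--
--         count = int(formula[start:index]) if index > start else 1
--
--         return atom, count, index
--
--     atom_counts, _ = parse_formula(formula, 0)
--
--     # Build result string
--     result = []
--     for atom in sorted(atom_counts.keys()):
--         count = atom_counts[atom]
--         result.append(atom)
--         if count > 1:
--             result.append(str(count))
--
--     return ''.join(result)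
-- ===== SOURCE B (Python) =====
-- def countOfAtoms_recursive(formula: str) -> str:
--     """Iterative re-implementation: one pass with an explicit stack of count dicts."""
--     n = len(formula)
--     stack = [{}]
--     i = 0
--     while i < n:
--         c = formula[i]
--         if c == '(':
--             stack.append({})
--             i += 1
--         elif c == ')':
--             if len(stack) == 1:
--                 break  # unmatched ')' ends parsing, as in the recursive early return
--             i += 1
--             j = i
--             while j < n and formula[j].isdigit():
--                 j += 1
--             mult = int(formula[i:j]) if j > i else 1
--             top = stack.pop()
--             dst = stack[-1]
--             for atom, cnt in top.items():
--                 dst[atom] = dst.get(atom, 0) + cnt * mult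
--             i = j
--         else:
--             j = i + 1
--             while j < n and formula[j].islower():
--                 j += 1
--             atom = formula[i:j]
--             k = j
--             while k < n and formula[k].isdigit():
--                 k += 1
--             cnt = int(formula[j:k]) if k > j else 1
--             top = stack[-1]
--             top[atom] = top.get(atom, 0) + cnt
--             i = k
--     # unmatched '(' groups close at end of string with multiplier 1
--     while len(stack) > 1:
--         top = stack.pop()
--         dst = stack[-1]
--         for atom, cnt in top.items():
--             dst[atom] = dst.get(atom, 0) + cnt
--     counts = stack[0]
--     return ''.join(a + (str(counts[a]) if counts[a] > 1 else '') for a in sorted(counts))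
-- ===== Notes on version B (the rewrite author's own statement) =====
-- stated objective: alternative
-- what changed: Replaced the recursive-descent parser (a recursive parse_formula whose callers apply group multipliers) by a single iterative scan that maintains an explicit stack of count dicts, pushing on '(' and popping/merging with the multiplier on ')'.
import Mathlib
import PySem

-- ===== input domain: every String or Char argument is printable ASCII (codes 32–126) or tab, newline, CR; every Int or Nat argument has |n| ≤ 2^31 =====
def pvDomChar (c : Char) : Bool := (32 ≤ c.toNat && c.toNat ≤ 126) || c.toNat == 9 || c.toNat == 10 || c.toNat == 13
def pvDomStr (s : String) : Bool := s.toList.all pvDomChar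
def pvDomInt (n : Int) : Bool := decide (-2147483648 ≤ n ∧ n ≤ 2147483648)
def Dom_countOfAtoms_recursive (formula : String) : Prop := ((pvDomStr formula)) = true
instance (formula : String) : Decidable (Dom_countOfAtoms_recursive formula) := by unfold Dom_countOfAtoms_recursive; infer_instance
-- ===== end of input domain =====

-- B replaces A's recursive-descent parser by one iterative scan over the string with an explicit
-- stack of count dicts (objective: alternative / idiomatic; same asymptotic cost).

-- Shared low-level helpers: both Python versions contain literally these scanning loops
-- ("while i < n and formula[i].islower(): i += 1", the digit twin, the int(slice)-or-1 default,
-- the "dst[atom] = dst.get(atom,0) + cnt*mult" merge loop and the sorted-keys rendering), so they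
-- are defined once and used by both ports.

/-- Counts dict: atom name (as list of chars) → count. -/
abbrev AtomCounts := PySem.Dict (List Char) Int

/-- `while i < n and formula[i].islower(): i += 1` — `islower` is exact on the ASCII domain.
    Fuel-indexed (fuel `cs.length` always suffices: the loop advances `i` and stops at the end). -/
def scanLower (cs : List Char) : Nat → Nat → Nat
  | 0, i => i
  | f + 1, i =>
    if h : i < cs.length then
      if cs[i].isLower then scanLower cs f (i + 1) else i
    else i

/-- `while i < n and formula[i].isdigit(): i += 1` — `isdigit` is exact on the ASCII domain. -/
def scanDigits (cs : List Char) : Nat → Nat → Nat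
  | 0, i => i
  | f + 1, i =>
    if h : i < cs.length then
      if cs[i].isDigit then scanDigits cs f (i + 1) else i
    else i

/-- `int(formula[a:b]) if b > a else 1`; the slice is a nonempty run of ASCII digits whenever
    `a < b`, so `ofChars?` is never `none` there and the `.getD 0` default is never used. -/
def numFrom (cs : List Char) (a b : Nat) : Int :=
  if a < b then (PySem.Int.ofChars? ((cs.drop a).take (b - a))).getD 0 else 1

/-- A's `parse_atom` (B inlines the same three scans): name = cs[i] plus following lowercase,
    then trailing digits as the count (default 1). Returns (atom, count, next index). -/
def parseAtom (cs : List Char) (i : Nat) : (List Char) × Int × Nat :=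
  let j := scanLower cs cs.length (i + 1)
  let atom := (cs.drop i).take (j - i)
  let k := scanDigits cs cs.length j
  (atom, numFrom cs j k, k)

/-- `counts[atom] += c` on a defaultdict(int) (same key order as dict.get-then-assign). -/
def addAtom (d : AtomCounts) (a : List Char) (c : Int) : AtomCounts :=
  d.insert a (d.getD a 0 + c)

/-- `for atom, cnt in src.items(): dst[atom] = dst.get(atom, 0) + cnt * m`. -/
def mergeInto (dst src : AtomCounts) (m : Int) : AtomCounts :=
  src.items.foldl (fun acc p => acc.insert p.1 (acc.getD p.1 0 + p.2 * m)) dst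

/-- Sorted-keys rendering: atom name, then the count if it exceeds 1, concatenated. -/
def render (d : AtomCounts) : String :=
  String.ofList ((PySem.List.sorted d.keys (fun x => x) false).foldl
    (fun acc a => acc ++ a ++ (if d.getD a 0 > 1 then PySem.Int.toChars (d.getD a 0) else [])) [])

-- ===== PORT A =====

/-- A's `parse_formula`: fuel-indexed recursion (fuel `cs.length + 1` suffices: every loop
    iteration at every depth strictly advances the index). Returns (counts, next index). -/
def parseFormulaA (cs : List Char) : Nat → AtomCounts → Nat → AtomCounts × Nat
  | 0, counts, i => (counts, i)
  | f + 1, counts, i =>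
    if h : i < cs.length then
      if cs[i] = '(' then
        let r := parseFormulaA cs f PySem.Dict.empty (i + 1)
        let i2 := scanDigits cs cs.length r.2
        parseFormulaA cs f (mergeInto counts r.1 (numFrom cs r.2 i2)) i2
      else if cs[i] = ')' then (counts, i + 1)
      else
        let t := parseAtom cs i
        parseFormulaA cs f (addAtom counts t.1 t.2.1) t.2.2
    else (counts, i)

def countOfAtoms_recursive (formula : String) : String :=
  let cs := formula.toList
  render (parseFormulaA cs (cs.length + 1) PySem.Dict.empty 0).1

-- ===== PORT B =====

/-- B's single scanning loop; the stack is kept as (top, rest) so it is never empty.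
    On an unmatched ')' (rest = []) it stops, like A's early return at top level.
    Fuel-indexed (fuel `cs.length + 1` suffices: every iteration strictly advances `i`). -/
def loopB (cs : List Char) : Nat → AtomCounts → List AtomCounts → Nat → AtomCounts × List AtomCounts
  | 0, top, rest, _ => (top, rest)
  | f + 1, top, rest, i =>
    if h : i < cs.length then
      if cs[i] = '(' then loopB cs f PySem.Dict.empty (top :: rest) (i + 1)
      else if cs[i] = ')' then
        match rest with
        | [] => (top, [])
        | e :: rest' =>
          let j := scanDigits cs cs.length (i + 1)
          loopB cs f (mergeInto e top (numFrom cs (i + 1) j)) rest' j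
      else
        let t := parseAtom cs i
        loopB cs f (addAtom top t.1 t.2.1) rest t.2.2
    else (top, rest)

/-- B's closing while-loop: merge remaining open groups downwards with multiplier 1. -/
def mergeStack (top : AtomCounts) : List AtomCounts → AtomCounts
  | [] => top
  | e :: rest => mergeStack (mergeInto e top 1) rest

def countOfAtoms_recursive_alt (formula : String) : String :=
  let cs := formula.toList
  let p := loopB cs (cs.length + 1) PySem.Dict.empty [] 0
  render (mergeStack p.1 p.2)

-- ===== PRECONDITION & SPEC =====
def Spec_countOfAtoms_recursive (formula : String) (out : String) : Prop := out = countOfAtoms_recursive_alt formula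
instance (formula : String) (out : String) : Decidable (Spec_countOfAtoms_recursive formula out) := by unfold Spec_countOfAtoms_recursive; infer_instance

-- ===== CLAIM (what is proved, stated in full; the proofs are below) =====
def Claim_equal_countOfAtoms_recursive : Prop := ∀ (formula : String), Dom_countOfAtoms_recursive formula → Spec_countOfAtoms_recursive formula (countOfAtoms_recursive formula)

-- ===== LEMMAS AND PROOFS =====

/-- Proof-side mirror of `parseFormulaA` that additionally reports HOW the level ended:
    `true` = returned by consuming a ')' , `false` = ran off the end of the string. -/
def refR (cs : List Char) : Nat → AtomCounts → Nat → AtomCounts × Nat × Bool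
  | 0, counts, i => (counts, i, false)
  | f + 1, counts, i =>
    if h : i < cs.length then
      if cs[i] = '(' then
        let r := refR cs f PySem.Dict.empty (i + 1)
        let i2 := scanDigits cs cs.length r.2.1
        refR cs f (mergeInto counts r.1 (numFrom cs r.2.1 i2)) i2
      else if cs[i] = ')' then (counts, i + 1, true)
      else
        let t := parseAtom cs i
        refR cs f (addAtom counts t.1 t.2.1) t.2.2
    else (counts, i, false)

theorem refR_parseFormulaA (cs : List Char) :
    ∀ (f : Nat) (d : AtomCounts) (i : Nat),
      parseFormulaA cs f d i = ((refR cs f d i).1, (refR cs f d i).2.1) := by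
  intro f
  induction f with
  | zero => intro d i; simp [parseFormulaA, refR]
  | succ f ih =>
    intro d i
    simp only [parseFormulaA, refR]
    split
    · split
      · rw [ih PySem.Dict.empty (i + 1)]
        exact ih _ _
      · split
        · rfl
        · exact ih _ _
    · rfl

theorem scanLower_ge (cs : List Char) :
    ∀ (f i : Nat), i ≤ scanLower cs f i := by
  intro f
  induction f with
  | zero => intro i; exact Nat.le_refl i
  | succ f ih =>
    intro i
    simp only [scanLower]
    split
    · split
      · exact Nat.le_trans (Nat.le_succ i) (ih (i + 1))
      · exact Nat.le_refl i
    · exact Nat.le_refl i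

theorem scanDigits_ge (cs : List Char) :
    ∀ (f i : Nat), i ≤ scanDigits cs f i := by
  intro f
  induction f with
  | zero => intro i; exact Nat.le_refl i
  | succ f ih =>
    intro i
    simp only [scanDigits]
    split
    · split
      · exact Nat.le_trans (Nat.le_succ i) (ih (i + 1))
      · exact Nat.le_refl i
    · exact Nat.le_refl i

theorem scanLower_le (cs : List Char) :
    ∀ (f i : Nat), i ≤ cs.length → scanLower cs f i ≤ cs.length := by
  intro f
  induction f with
  | zero => intro i h; exact h
  | succ f ih =>
    intro i h
    simp only [scanLower]
    split
    · split
      · exact ih (i + 1) (by omega)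
      · exact h
    · exact h

theorem scanDigits_le (cs : List Char) :
    ∀ (f i : Nat), i ≤ cs.length → scanDigits cs f i ≤ cs.length := by
  intro f
  induction f with
  | zero => intro i h; exact h
  | succ f ih =>
    intro i h
    simp only [scanDigits]
    split
    · split
      · exact ih (i + 1) (by omega)
      · exact h
    · exact h

theorem parseAtom_idx_gt (cs : List Char) (i : Nat) : i < (parseAtom cs i).2.2 := by
  have h1 := scanLower_ge cs cs.length (i + 1)
  have h2 := scanDigits_ge cs cs.length (scanLower cs cs.length (i + 1))
  simp only [parseAtom]
  omega

theorem parseAtom_idx_le (cs : List Char) (i : Nat) (h : i < cs.length) :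
    (parseAtom cs i).2.2 ≤ cs.length := by
  simp only [parseAtom]
  exact scanDigits_le cs _ _ (scanLower_le cs _ (i + 1) (by omega))

/-- A level run starting at (or past) the end of the string exits at once, by EOF. -/
theorem refR_eof (cs : List Char) (f : Nat) (d : AtomCounts) (i : Nat)
    (hi : cs.length ≤ i) (hf : 0 < f) : refR cs f d i = (d, i, false) := by
  cases f with
  | zero => omega
  | succ f => rw [refR]; rw [dif_neg (by omega)]

/-- Exit facts about a level run: the index never moves back, stays in range,
    an EOF exit is exactly at the end, a ')' exit strictly advanced. -/
theorem refR_exit (cs : List Char) :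
    ∀ (f : Nat) (d : AtomCounts) (i : Nat), i ≤ cs.length → cs.length - i < f →
      i ≤ (refR cs f d i).2.1 ∧ (refR cs f d i).2.1 ≤ cs.length ∧
      ((refR cs f d i).2.2 = false → (refR cs f d i).2.1 = cs.length) ∧
      ((refR cs f d i).2.2 = true → i < (refR cs f d i).2.1) := by
  intro f
  induction f with
  | zero => intro d i h hf; omega
  | succ f ih =>
    intro d i h hf
    simp only [refR]
    split
    · rename_i hlt
      split
      · -- '(' branch
        have hn := ih PySem.Dict.empty (i + 1) (by omega) (by omega)
        have hsge := scanDigits_ge cs cs.length (refR cs f PySem.Dict.empty (i + 1)).2.1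
        have hsle := scanDigits_le cs cs.length (refR cs f PySem.Dict.empty (i + 1)).2.1 hn.2.1
        have hc := ih (mergeInto d (refR cs f PySem.Dict.empty (i + 1)).1
            (numFrom cs (refR cs f PySem.Dict.empty (i + 1)).2.1
              (scanDigits cs cs.length (refR cs f PySem.Dict.empty (i + 1)).2.1)))
          (scanDigits cs cs.length (refR cs f PySem.Dict.empty (i + 1)).2.1) (by omega) (by omega)
        refine ⟨by omega, hc.2.1, hc.2.2.1, fun ht => by have := hc.2.2.2 ht; omega⟩
      · split
        · exact ⟨by dsimp only; omega, by dsimp only; omega,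
            by dsimp only; intro hx; exact absurd hx (by simp),
            by dsimp only; intro _; omega⟩
        · -- atom branch
          rename_i hcl
          have hgt := parseAtom_idx_gt cs i
          have hle := parseAtom_idx_le cs i hlt
          have hc := ih (addAtom d (parseAtom cs i).1 (parseAtom cs i).2.1)
            (parseAtom cs i).2.2 (by omega) (by omega)
          refine ⟨by omega, hc.2.1, hc.2.2.1, fun ht => by have := hc.2.2.2 ht; omega⟩
    · exact ⟨by dsimp only; omega, by dsimp only; omega, by dsimp only; intro _; omega,
        by dsimp only; intro hx; exact absurd hx (by simp)⟩

/-- Any two sufficient fuels run B's loop to the same state. -/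
theorem loopB_congr (cs : List Char) :
    ∀ (f1 f2 : Nat) (top : AtomCounts) (rest : List AtomCounts) (i : Nat),
      cs.length - i < f1 → cs.length - i < f2 →
      loopB cs f1 top rest i = loopB cs f2 top rest i := by
  intro f1
  induction f1 with
  | zero => intro f2 top rest i h1 h2; omega
  | succ f1 ih =>
    intro f2 top rest i h1 h2
    cases f2 with
    | zero => omega
    | succ f2 =>
      simp only [loopB]
      split
      · rename_i hlt
        split
        · exact ih f2 PySem.Dict.empty (top :: rest) (i + 1) (by omega) (by omega)
        · split
          · cases rest with
            | nil => rfl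
            | cons e rest' =>
              have hsge := scanDigits_ge cs cs.length (i + 1)
              exact ih f2 _ rest' _ (by omega) (by omega)
          · have hgt := parseAtom_idx_gt cs i
            exact ih f2 _ rest _ (by omega) (by omega)
      · rfl

/-- The bottom dict once B's loop has finished and the stack was merged down. -/
def runB (cs : List Char) (top : AtomCounts) (rest : List AtomCounts) (i : Nat) : AtomCounts :=
  let p := loopB cs (cs.length + 1) top rest i
  mergeStack p.1 p.2

theorem scanDigits_at_end (cs : List Char) (f : Nat) : scanDigits cs f cs.length = cs.length := by
  cases f with
  | zero => rfl
  | succ f => simp [scanDigits]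

theorem loopB_succ (cs : List Char) (f : Nat) (top : AtomCounts) (rest : List AtomCounts) (i : Nat) :
    loopB cs (f + 1) top rest i =
      (if h : i < cs.length then
        if cs[i] = '(' then loopB cs f PySem.Dict.empty (top :: rest) (i + 1)
        else if cs[i] = ')' then
          match rest with
          | [] => (top, [])
          | e :: rest' =>
            let j := scanDigits cs cs.length (i + 1)
            loopB cs f (mergeInto e top (numFrom cs (i + 1) j)) rest' j
        else
          let t := parseAtom cs i
          loopB cs f (addAtom top t.1 t.2.1) rest t.2.2
      else (top, rest)) := by
  simp only [loopB]

theorem runB_eq (cs : List Char) (top : AtomCounts) (rest : List AtomCounts) (i : Nat) :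
    runB cs top rest i =
      mergeStack (loopB cs (cs.length + 1) top rest i).1 (loopB cs (cs.length + 1) top rest i).2 :=
  rfl

/-- Simulation: B's stack machine from any state computes exactly what A's recursive level run
    followed by its caller's continuation computes. -/
theorem simB (cs : List Char) :
    ∀ (f : Nat) (i : Nat) (d : AtomCounts) (rest : List AtomCounts),
      i ≤ cs.length → cs.length - i < f →
      runB cs d rest i =
        (let r := refR cs f d i
         if r.2.2 then
           match rest with
           | [] => r.1
           | e :: rest' =>
             runB cs (mergeInto e r.1 (numFrom cs r.2.1 (scanDigits cs cs.length r.2.1))) rest'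
               (scanDigits cs cs.length r.2.1)
         else mergeStack r.1 rest) := by
  intro f
  induction f with
  | zero => intro i d rest h hf; omega
  | succ f ih =>
    intro i d rest h hf
    by_cases hlt : i < cs.length
    · by_cases hpar : cs[i]'hlt = '('
      · -- '(' : a nested level begins
        have hrec := ih (i + 1) PySem.Dict.empty (d :: rest) (by omega) (by omega)
        have hn := refR_exit cs f PySem.Dict.empty (i + 1) (by omega) (by omega)
        rw [runB_eq] at hrec ⊢
        conv_lhs => rw [loopB_succ]
        rw [refR]
        simp only [dif_pos hlt, if_pos hpar]
        rw [loopB_congr cs cs.length (cs.length + 1) PySem.Dict.empty (d :: rest) (i + 1)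
          (by omega) (by omega)]
        rw [hrec]
        rcases hr : refR cs f PySem.Dict.empty (i + 1) with ⟨nd, j, b⟩
        rw [hr] at hn
        cases b with
        | false =>
          -- nested run hit EOF: index is at the end, multiplier defaults to 1
          have hj : j = cs.length := hn.2.2.1 rfl
          subst hj
          dsimp only
          rw [scanDigits_at_end]
          have hnum : numFrom cs cs.length cs.length = 1 := by simp [numFrom]
          rw [hnum, refR_eof cs f _ cs.length (le_refl _) (by omega)]
          simp [mergeStack]
        | true =>
          have hjgt : i + 1 < j := hn.2.2.2 rfl
          have hjle : j ≤ cs.length := hn.2.1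
          have hsge := scanDigits_ge cs cs.length j
          have hsle := scanDigits_le cs cs.length j hjle
          have hcont := ih (scanDigits cs cs.length j)
            (mergeInto d nd (numFrom cs j (scanDigits cs cs.length j))) rest (by omega) (by omega)
          rw [if_pos rfl]
          dsimp only
          rw [hcont]
      · by_cases hcl : cs[i]'hlt = ')'
        · -- ')' : close the group (or stop on an unmatched ')')
          rw [runB_eq]
          conv_lhs => rw [loopB_succ]
          rw [refR]
          simp only [dif_pos hlt, if_neg hpar, if_pos hcl]
          cases rest with
          | nil => simp [mergeStack]
          | cons e rest' =>
            have hsge := scanDigits_ge cs cs.length (i + 1)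
            dsimp only
            rw [loopB_congr cs cs.length (cs.length + 1)
              (mergeInto e d (numFrom cs (i + 1) (scanDigits cs cs.length (i + 1)))) rest'
              (scanDigits cs cs.length (i + 1)) (by omega) (by omega)]
            rw [runB_eq]
            simp
          -- both sides are now the same continuation state
        · -- atom
          have hgt := parseAtom_idx_gt cs i
          have hle := parseAtom_idx_le cs i hlt
          have hrec := ih (parseAtom cs i).2.2
            (addAtom d (parseAtom cs i).1 (parseAtom cs i).2.1) rest (by omega) (by omega)
          rw [runB_eq] at hrec ⊢
          conv_lhs => rw [loopB_succ]
          rw [refR]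
          simp only [dif_pos hlt, if_neg hpar, if_neg hcl]
          rw [loopB_congr cs cs.length (cs.length + 1)
            (addAtom d (parseAtom cs i).1 (parseAtom cs i).2.1) rest
            (parseAtom cs i).2.2 (by omega) (by omega)]
          exact hrec
    · -- end of string
      rw [runB_eq]
      conv_lhs => rw [loopB_succ]
      rw [dif_neg hlt, refR_eof cs (f + 1) d i (by omega) (by omega)]
      simp

-- ===== VERDICT (by name: the statement is the Claim_ definition above) =====
theorem countOfAtoms_recursive_spec : Claim_equal_countOfAtoms_recursive := by
  intro formula _
  simp only [Spec_countOfAtoms_recursive, countOfAtoms_recursive, countOfAtoms_recursive_alt]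
  have hs := simB formula.toList (formula.toList.length + 1) 0 PySem.Dict.empty []
    (Nat.zero_le _) (by omega)
  have hpa := refR_parseFormulaA formula.toList (formula.toList.length + 1) PySem.Dict.empty 0
  rw [runB_eq] at hs
  rcases hr : refR formula.toList (formula.toList.length + 1) PySem.Dict.empty 0 with ⟨d', j, b⟩
  rw [hr] at hs hpa
  cases b with
  | false => rw [hpa, hs]; rfl
  | true => rw [hpa, hs]; rfl
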